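-- pv_equiv track=rewrite | github.com/TaiLinhares/named-after-men | src/main.py | text_concat
-- ===== SOURCE A (Python) =====
-- def text_concat(names,tag_o='',tag_c=''):
--     '''Concatenate list of names and apply conjunction
--     Returns concatenated list of names'''
--
--     text = ''
--
--     for i,m in enumerate(names):
--         if len(names) == 1:
--             text += tag_o + m + tag_c
--
--         elif (len(names)-1) == i:
--             text += 'and ' + tag_o + m + tag_c
--
--         else:
--             text += tag_o + m + tag_c + ', '
--
--     return text
-- ===== SOURCE B (Python) =====
-- def text_concat(names, tag_o='', tag_c=''):
--     wrapped = [tag_o + m + tag_c for m in names]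
--     if not wrapped:
--         return ''
--     if len(wrapped) == 1:
--         return wrapped[0]
--     return ', '.join(wrapped[:-1]) + ', and ' + wrapped[-1]
-- ===== Notes on version B (the rewrite author's own statement) =====
-- stated objective: simpler
-- what changed: Replaces the per-element index/length branching inside the loop by wrapping every name once and composing the result by case on the list length: empty, single, or join of all-but-last plus ', and ' plus the last.
import Mathlib
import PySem

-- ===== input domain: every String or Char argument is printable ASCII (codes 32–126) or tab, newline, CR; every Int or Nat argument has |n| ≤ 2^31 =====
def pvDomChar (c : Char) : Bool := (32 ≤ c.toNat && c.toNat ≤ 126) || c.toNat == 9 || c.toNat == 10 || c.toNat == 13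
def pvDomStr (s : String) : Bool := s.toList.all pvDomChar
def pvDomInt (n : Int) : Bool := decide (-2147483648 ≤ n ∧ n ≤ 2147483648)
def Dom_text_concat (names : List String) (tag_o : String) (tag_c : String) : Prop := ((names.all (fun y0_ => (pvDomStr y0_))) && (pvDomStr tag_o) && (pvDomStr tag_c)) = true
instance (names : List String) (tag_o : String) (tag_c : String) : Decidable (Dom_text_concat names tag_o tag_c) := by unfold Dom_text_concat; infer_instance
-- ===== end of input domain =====

-- B builds the wrapped names once and joins all-but-last uniformly, appending ', and ' + last once,
-- instead of A's per-iteration index/length branching; objective: simpler. Return value only, no mutation.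

-- ===== PORT A =====
def text_concat (names : List String) (tag_o : String) (tag_c : String) : String :=
  let o := tag_o.toList
  let c := tag_c.toList
  String.ofList <|
    (PySem.List.enumerate names).foldl
      (fun text im =>
        if names.length == 1 then text ++ (o ++ im.2.toList ++ c)
        else if (names.length : Int) - 1 == im.1 then
          text ++ (['a','n','d',' '] ++ o ++ im.2.toList ++ c)
        else text ++ (o ++ im.2.toList ++ c ++ [',',' ']))
      []

-- ===== PORT B =====
def text_concat_alt (names : List String) (tag_o : String) (tag_c : String) : String :=
  let wrapped := names.map (fun m => tag_o.toList ++ m.toList ++ tag_c.toList)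
  String.ofList <|
    match wrapped with
    | [] => []
    | [w] => w
    | w :: ws =>
        PySem.Chars.join [',',' '] ((w :: ws).dropLast) ++ [',',' ','a','n','d',' ']
          ++ (w :: ws).getLastD []

-- ===== PRECONDITION & SPEC =====
def Spec_text_concat (names : List String) (tag_o : String) (tag_c : String) (out : String) : Prop := out = text_concat_alt names tag_o tag_c
instance (names : List String) (tag_o : String) (tag_c : String) (out : String) : Decidable (Spec_text_concat names tag_o tag_c out) := by unfold Spec_text_concat; infer_instance

-- ===== CLAIM (what is proved, stated in full; the proofs are below) =====
def Claim_equal_text_concat : Prop := ∀ (names : List String) (tag_o : String) (tag_c : String), Dom_text_concat names tag_o tag_c → Spec_text_concat names tag_o tag_c (text_concat names tag_o tag_c)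

-- ===== LEMMAS AND PROOFS =====

def pvWrap (o c : List Char) (m : String) : List Char := o ++ m.toList ++ c

def pvPieces (o c : List Char) : List String → List Char
  | [] => []
  | m :: rest =>
      if rest.isEmpty then ['a','n','d',' '] ++ pvWrap o c m
      else pvWrap o c m ++ [',',' '] ++ pvPieces o c rest

theorem pvEnum_cons {α : Type} (x : α) (l : List α) (s : Int) :
    PySem.List.enumerate (x :: l) s = (s, x) :: PySem.List.enumerate l (s + 1) := rfl

theorem pvFoldA (o c : List Char) (nn : Nat) (hnn : nn ≠ 1) :
    ∀ (l : List String) (start : Int) (acc : List Char),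
      start + l.length = (nn : Int) →
      (PySem.List.enumerate l start).foldl
        (fun text (im : Int × String) =>
          if nn == 1 then text ++ (o ++ im.2.toList ++ c)
          else if (nn : Int) - 1 == im.1 then
            text ++ (['a','n','d',' '] ++ o ++ im.2.toList ++ c)
          else text ++ (o ++ im.2.toList ++ c ++ [',',' ']))
        acc = acc ++ pvPieces o c l := by
  intro l
  induction l with
  | nil => intro start acc _; simp [PySem.List.enumerate, pvPieces]
  | cons m rest ih =>
      intro start acc h
      rw [pvEnum_cons, List.foldl_cons]
      cases rest with
      | nil =>
          have h2 : (nn : Int) - 1 = start := by simp at h; omega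
          simp [PySem.List.enumerate, pvPieces, pvWrap, hnn, h2]
      | cons b rest' =>
          have h' : (start + 1) + ((b :: rest').length : Int) = (nn : Int) := by
            simp at h ⊢; omega
          rw [ih (start + 1) _ h']
          have h2 : ¬ ((nn : Int) - 1 = start) := by simp at h; omega
          simp [pvPieces, pvWrap, hnn, h2]

theorem pvPieces_eq (o c : List Char) :
    ∀ (l : List String) (m b : String),
      pvPieces o c (m :: b :: l)
        = PySem.Chars.join [',',' '] ((List.map (pvWrap o c) (m :: b :: l)).dropLast)
            ++ [',',' ','a','n','d',' '] ++ (List.map (pvWrap o c) (m :: b :: l)).getLastD [] := by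
  intro l
  induction l with
  | nil =>
      intro m b
      simp [pvPieces, pvWrap, PySem.Chars.join, List.intercalate]
  | cons a l ih =>
      intro m b
      have := ih b a
      simp [pvPieces, PySem.Chars.join, List.intercalate] at this ⊢
      rw [this]

-- ===== VERDICT (by name: the statement is the Claim_ definition above) =====
theorem text_concat_spec : Claim_equal_text_concat := by
  intro names tag_o tag_c _
  unfold Spec_text_concat
  match names with
  | [] => simp [text_concat, text_concat_alt, PySem.List.enumerate]
  | [m] => simp [text_concat, text_concat_alt, PySem.List.enumerate]
  | m :: b :: rest =>
      have hA := pvFoldA tag_o.toList tag_c.toList (m :: b :: rest).length (by simp)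
        (m :: b :: rest) 0 [] (by simp)
      have hB := pvPieces_eq tag_o.toList tag_c.toList rest m b
      simp only [text_concat, text_concat_alt]
      rw [hA, hB]
      have hw : pvWrap tag_o.toList tag_c.toList
          = fun m => tag_o.toList ++ m.toList ++ tag_c.toList := rfl
      simp [hw]
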